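-- pv_equiv track=rewrite | github.com/LindsayXu123/EDID_Editor | utils.py | encode_established_timings
-- ===== SOURCE A (Python) =====
-- def encode_established_timings(selected_timings, manufacturer_byte=0x00):
--     established_timings = [
--         "720x400 @ 70Hz", "720x400 @ 88Hz", "640x480 @ 60Hz", "640x480 @ 67Hz",
--         "640x480 @ 72Hz", "640x480 @ 75Hz", "800x600 @ 56Hz", "800x600 @ 60Hz",
--         "800x600 @ 72Hz", "800x600 @ 75Hz", "832x624 @ 75Hz", "1024x768 @ 87Hz (interlaced)",
--         "1024x768 @ 60Hz", "1024x768 @ 70Hz", "1024x768 @ 75Hz", "1280x1024 @ 75Hz"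
--     ]
--
--     timing1 = 0
--     timing2 = 0
--
--     for i, name in enumerate(established_timings):
--         if name in selected_timings:
--             if i < 8:
--                 timing1 |= (1 << (7 - i))
--             else:
--                 timing2 |= (1 << (15 - i))
--
--     return f"{timing1:02X} {timing2:02X} {manufacturer_byte:02X}"
-- ===== SOURCE B (Python) =====
-- # Single 16-bit word ORed from a name->bit-mask dict while iterating the
-- # selection (instead of scanning the fixed 16-name list with membership tests);
-- # the two bytes are then extracted by shift/mask.
-- _TIMING_BITS = {
--     "720x400 @ 70Hz": 0x8000, "720x400 @ 88Hz": 0x4000, "640x480 @ 60Hz": 0x2000,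
--     "640x480 @ 67Hz": 0x1000, "640x480 @ 72Hz": 0x0800, "640x480 @ 75Hz": 0x0400,
--     "800x600 @ 56Hz": 0x0200, "800x600 @ 60Hz": 0x0100, "800x600 @ 72Hz": 0x0080,
--     "800x600 @ 75Hz": 0x0040, "832x624 @ 75Hz": 0x0020, "1024x768 @ 87Hz (interlaced)": 0x0010,
--     "1024x768 @ 60Hz": 0x0008, "1024x768 @ 70Hz": 0x0004, "1024x768 @ 75Hz": 0x0002,
--     "1280x1024 @ 75Hz": 0x0001,
-- }
--
--
-- def encode_established_timings(selected_timings, manufacturer_byte=0x00):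
--     word = 0
--     for name in selected_timings:
--         word |= _TIMING_BITS.get(name, 0)
--     return f"{word >> 8:02X} {word & 0xFF:02X} {manufacturer_byte:02X}"
-- ===== Notes on version B (the rewrite author's own statement) =====
-- stated objective: faster
-- what changed: Instead of scanning the fixed 16-name list with a linear membership test of the selection per name and maintaining two separate byte accumulators, B iterates the selection once, ORing masks from a precomputed name-to-bit-mask dict into a single 16-bit word, and extracts the two bytes by shift/mask.
import Mathlib
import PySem

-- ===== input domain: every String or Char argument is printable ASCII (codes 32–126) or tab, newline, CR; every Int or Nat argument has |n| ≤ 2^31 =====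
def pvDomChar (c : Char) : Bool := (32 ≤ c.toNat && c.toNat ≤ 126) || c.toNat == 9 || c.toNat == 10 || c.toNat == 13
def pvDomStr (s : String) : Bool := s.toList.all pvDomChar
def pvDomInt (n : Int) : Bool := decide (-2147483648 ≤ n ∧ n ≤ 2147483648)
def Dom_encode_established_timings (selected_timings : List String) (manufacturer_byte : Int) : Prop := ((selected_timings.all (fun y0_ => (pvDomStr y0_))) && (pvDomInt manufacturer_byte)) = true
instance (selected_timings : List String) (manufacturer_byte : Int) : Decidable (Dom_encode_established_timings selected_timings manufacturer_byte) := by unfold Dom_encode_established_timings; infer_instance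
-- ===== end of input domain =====

-- B replaces A's scan of the fixed 16-name list (membership test per name, two
-- byte accumulators) by a single 16-bit word ORed together while iterating the
-- selection with a name→bit-mask dict; bytes are then extracted by shift/mask.

-- ===== PORT A =====
-- shared helper: Python's f"{n:02X}" (uppercase hex, zero-padded to width 2,
-- '-' sign first for negatives) — identical literal code in both Pythons
def pvHexDigitChar (d : Nat) : Char := if d < 10 then Char.ofNat (48 + d) else Char.ofNat (55 + d)

def pvHexAux (n : Nat) (acc : List Char) : List Char :=
  if h : n = 0 then acc else pvHexAux (n / 16) (pvHexDigitChar (n % 16) :: acc)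
  termination_by n
  decreasing_by exact Nat.div_lt_self (Nat.pos_of_ne_zero h) (by norm_num)

def pvFmt02X (n : Int) : String :=
  String.ofList (PySem.Chars.zfill
    ((if n < 0 then ['-'] else []) ++ (if n.natAbs = 0 then ['0'] else pvHexAux n.natAbs [])) 2)

def pvEstablishedTimings : List String := [
    "720x400 @ 70Hz", "720x400 @ 88Hz", "640x480 @ 60Hz", "640x480 @ 67Hz",
    "640x480 @ 72Hz", "640x480 @ 75Hz", "800x600 @ 56Hz", "800x600 @ 60Hz",
    "800x600 @ 72Hz", "800x600 @ 75Hz", "832x624 @ 75Hz", "1024x768 @ 87Hz (interlaced)",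
    "1024x768 @ 60Hz", "1024x768 @ 70Hz", "1024x768 @ 75Hz", "1280x1024 @ 75Hz"]

def encode_established_timings (selected_timings : List String) (manufacturer_byte : Int) : String :=
  -- for i, name in enumerate(established_timings): membership test, |= of 1 << (7-i) / 1 << (15-i)
  let r := (PySem.List.enumerate pvEstablishedTimings).foldl
    (fun (tt : Int × Int) (p : Int × String) =>
      if selected_timings.contains p.2 then
        if p.1 < 8 then (PySem.Int.bor tt.1 (1 <<< (7 - p.1)), tt.2)
        else (tt.1, PySem.Int.bor tt.2 (1 <<< (15 - p.1)))
      else tt) (0, 0)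
  String.ofList ((pvFmt02X r.1).toList ++ ' ' :: (pvFmt02X r.2).toList ++ ' ' :: (pvFmt02X manufacturer_byte).toList)

-- ===== PORT B =====
def pvTimingBits : PySem.Dict String Int := PySem.Dict.ofList [
    ("720x400 @ 70Hz", 0x8000), ("720x400 @ 88Hz", 0x4000), ("640x480 @ 60Hz", 0x2000),
    ("640x480 @ 67Hz", 0x1000), ("640x480 @ 72Hz", 0x0800), ("640x480 @ 75Hz", 0x0400),
    ("800x600 @ 56Hz", 0x0200), ("800x600 @ 60Hz", 0x0100), ("800x600 @ 72Hz", 0x0080),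
    ("800x600 @ 75Hz", 0x0040), ("832x624 @ 75Hz", 0x0020), ("1024x768 @ 87Hz (interlaced)", 0x0010),
    ("1024x768 @ 60Hz", 0x0008), ("1024x768 @ 70Hz", 0x0004), ("1024x768 @ 75Hz", 0x0002),
    ("1280x1024 @ 75Hz", 0x0001)]

def encode_established_timings_alt (selected_timings : List String) (manufacturer_byte : Int) : String :=
  -- for name in selected_timings: word |= _TIMING_BITS.get(name, 0)
  let word := selected_timings.foldl (fun w name => PySem.Int.bor w (pvTimingBits.getD name 0)) 0
  String.ofList ((pvFmt02X (word >>> (8 : Nat))).toList ++ ' ' ::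
             (pvFmt02X (PySem.Int.band word 255)).toList ++ ' ' ::
             (pvFmt02X manufacturer_byte).toList)

-- ===== PRECONDITION & SPEC =====
def Spec_encode_established_timings (selected_timings : List String) (manufacturer_byte : Int) (out : String) : Prop := out = encode_established_timings_alt selected_timings manufacturer_byte
instance (selected_timings : List String) (manufacturer_byte : Int) (out : String) : Decidable (Spec_encode_established_timings selected_timings manufacturer_byte out) := by unfold Spec_encode_established_timings; infer_instance

-- ===== CLAIM (what is proved, stated in full; the proofs are below) =====
def Claim_equal_encode_established_timings : Prop := ∀ (selected_timings : List String) (manufacturer_byte : Int), Dom_encode_established_timings selected_timings manufacturer_byte → Spec_encode_established_timings selected_timings manufacturer_byte (encode_established_timings selected_timings manufacturer_byte)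

-- ===== LEMMAS AND PROOFS =====

-- Nat-level shadow of B's accumulator
def pvBitN (x : String) : Nat := (pvTimingBits.getD x 0).toNat

def pvWordN (sel : List String) (a : Nat) : Nat := sel.foldl (fun w n => w ||| pvBitN n) a

-- the 16 (name, bit position in the 16-bit word) pairs
def pvKeys16 : List (String × Nat) := [
    ("720x400 @ 70Hz", 15), ("720x400 @ 88Hz", 14), ("640x480 @ 60Hz", 13),
    ("640x480 @ 67Hz", 12), ("640x480 @ 72Hz", 11), ("640x480 @ 75Hz", 10),
    ("800x600 @ 56Hz", 9), ("800x600 @ 60Hz", 8), ("800x600 @ 72Hz", 7),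
    ("800x600 @ 75Hz", 6), ("832x624 @ 75Hz", 5), ("1024x768 @ 87Hz (interlaced)", 4),
    ("1024x768 @ 60Hz", 3), ("1024x768 @ 70Hz", 2), ("1024x768 @ 75Hz", 1),
    ("1280x1024 @ 75Hz", 0)]

theorem pvTimingBits_map :
    pvTimingBits = PySem.Dict.mk (pvKeys16.map (fun q => (q.1, ((2 : Int) ^ q.2)))) := by decide

theorem pv_any_key_false (bl : List (String × Nat)) (x : String) (f : String × Nat → Bool)
    (hx : ∀ q ∈ bl, (q.1 == x) = false) :
    bl.any (fun q => (q.1 == x) && f q) = false := by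
  induction bl with
  | nil => rfl
  | cons q bl ih =>
    simp only [List.any_cons, hx q (by simp), Bool.false_and, Bool.false_or]
    exact ih (fun r hr => hx r (by simp [hr]))

theorem pv_getD_mk_nonneg (bl : List (String × Nat)) (x : String) :
    0 ≤ (PySem.Dict.mk (bl.map (fun q => (q.1, ((2 : Int) ^ q.2))))).getD x 0 := by
  induction bl with
  | nil => simp [PySem.Dict.getD, PySem.Dict.get?]
  | cons q bl ih =>
    simp only [List.map_cons, PySem.Dict.getD, PySem.Dict.get?_mk_cons]
    by_cases hq : (q.1 == x) = true
    · rw [hq, if_pos rfl]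
      simp only [Option.getD_some]
      positivity
    · simp only [Bool.not_eq_true] at hq
      rw [hq, if_neg (by simp)]
      exact ih

theorem pvGetD_nonneg (x : String) : 0 ≤ pvTimingBits.getD x 0 := by
  rw [pvTimingBits_map]; exact pv_getD_mk_nonneg pvKeys16 x

theorem pv_getD_mk_testBit (bl : List (String × Nat)) (hnd : (bl.map Prod.fst).Nodup)
    (x : String) (j : Nat) :
    (((PySem.Dict.mk (bl.map (fun q => (q.1, ((2 : Int) ^ q.2))))).getD x 0)).toNat.testBit j
      = bl.any (fun q => (q.1 == x) && decide (q.2 = j)) := by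
  induction bl with
  | nil => simp [PySem.Dict.getD, PySem.Dict.get?]
  | cons q bl ih =>
    simp only [List.map_cons, PySem.Dict.getD, PySem.Dict.get?_mk_cons, List.any_cons]
    simp only [List.map_cons, List.nodup_cons] at hnd
    by_cases hq : (q.1 == x) = true
    · rw [hq, if_pos rfl]
      have hrest : bl.any (fun r => (r.1 == x) && decide (r.2 = j)) = false := by
        refine pv_any_key_false bl x _ (fun r hr => ?_)
        have : r.1 ≠ q.1 := by
          intro h; exact hnd.1 (by simpa [h] using List.mem_map_of_mem (f := Prod.fst) hr)
        have hx : x = q.1 := (beq_iff_eq.mp hq).symm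
        simp [hx, this]
      rw [hrest]
      simp only [Option.getD_some, Bool.true_and, Bool.or_false]
      rw [show ((2:Int) ^ q.2).toNat = 2 ^ q.2 by
        rw [show ((2:Int)) = ((2:Nat):Int) from rfl, ← Nat.cast_pow, Int.toNat_natCast]]
      exact Nat.testBit_two_pow
    · simp only [Bool.not_eq_true] at hq
      rw [hq, if_neg (by simp)]
      simp only [Bool.false_and, Bool.false_or]
      exact ih hnd.2

theorem pvBitN_testBit (x : String) (j : Nat) :
    (pvBitN x).testBit j = pvKeys16.any (fun q => (q.1 == x) && decide (q.2 = j)) := by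
  unfold pvBitN
  rw [pvTimingBits_map]
  exact pv_getD_mk_testBit pvKeys16 (by decide) x j

theorem pv_any_swap {α β : Type} (l : List α) (m : List β) (f : α → β → Bool) :
    l.any (fun x => m.any (f x)) = m.any (fun y => l.any (fun x => f x y)) := by
  rw [Bool.eq_iff_iff]
  simp only [List.any_eq_true]
  tauto

theorem pv_any_beq_and (l : List String) (k : String) (c : Bool) :
    l.any (fun x => (k == x) && c) = (l.contains k && c) := by
  cases c
  · simp
  · simp only [Bool.and_true]
    exact List.contains_eq_any_beq.symm

theorem pv_any_congr {α : Type} (l : List α) (f g : α → Bool) (h : ∀ x ∈ l, f x = g x) :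
    l.any f = l.any g := by
  induction l with
  | nil => rfl
  | cons x xs ih =>
    simp only [List.any_cons, h x (by simp)]
    rw [ih (fun y hy => h y (by simp [hy]))]

theorem pvWordN_any (sel : List String) (a : Nat) (j : Nat) :
    (pvWordN sel a).testBit j = (a.testBit j || sel.any fun x => (pvBitN x).testBit j) := by
  induction sel generalizing a with
  | nil => simp [pvWordN]
  | cons x xs ih =>
    show (pvWordN xs (a ||| pvBitN x)).testBit j = _
    rw [ih, Nat.testBit_lor]
    simp [Bool.or_assoc]

theorem pvWordN_testBit (sel : List String) (a : Nat) (j : Nat) :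
    (pvWordN sel a).testBit j
      = (a.testBit j || pvKeys16.any (fun q => sel.contains q.1 && decide (q.2 = j))) := by
  rw [pvWordN_any]
  congr 1
  rw [pv_any_congr sel _ _ (fun x _ => pvBitN_testBit x j), pv_any_swap]
  exact pv_any_congr _ _ _ (fun q _ => pv_any_beq_and sel q.1 _)

-- B's Int fold is the cast of the Nat fold
theorem pvB_cast (sel : List String) (a : Nat) :
    sel.foldl (fun w name => PySem.Int.bor w (pvTimingBits.getD name 0)) (a : Int) = (pvWordN sel a : Int) := by
  induction sel generalizing a with
  | nil => rfl
  | cons x xs ih =>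
    simp only [List.foldl_cons]
    rw [show pvTimingBits.getD x 0 = ((pvBitN x : Nat) : Int) from
      (Int.toNat_of_nonneg (pvGetD_nonneg x)).symm, PySem.Int.bor_natCast]
    exact ih _

-- generic Nat-level testBit characterisation of a guarded or-fold
theorem pv_foldl_ite_or_testBit {α : Type} (c : α → Bool) (f : α → Nat) (l : List α) (a : Nat) (j : Nat) :
    (l.foldl (fun t x => if c x then t ||| f x else t) a).testBit j
      = (a.testBit j || l.any fun x => c x && (f x).testBit j) := by
  induction l generalizing a with
  | nil => simp
  | cons x xs ih =>
    simp only [List.foldl_cons, List.any_cons]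
    by_cases hc : c x
    · rw [hc]; simp only [if_true, ih, Nat.testBit_lor]
      simp [Bool.or_assoc]
    · simp only [Bool.not_eq_true] at hc
      rw [hc]; simp [ih]

-- cast lemmas for the two components of A's fold
theorem pvA_cast1 (sel : List String) (l : List (Int × String)) (hl : ∀ p ∈ l, 0 ≤ p.1) (n : Nat) :
    l.foldl (fun (a : Int) (p : Int × String) =>
        if sel.contains p.2 && decide (p.1 < 8) then PySem.Int.bor a (1 <<< ((7 : Int) - p.1)) else a) (n : Int)
    = ((l.foldl (fun (a : Nat) (p : Int × String) =>
        if sel.contains p.2 && decide (p.1 < 8) then a ||| 2 ^ (7 - p.1.toNat) else a) n : Nat) : Int) := by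
  induction l generalizing n with
  | nil => rfl
  | cons p l ih =>
    simp only [List.foldl_cons]
    by_cases hc : (sel.contains p.2 && decide (p.1 < 8)) = true
    · have h8 : p.1 < 8 := by
        have := hc
        simp only [Bool.and_eq_true, decide_eq_true_eq] at this
        exact this.2
      have h0 : 0 ≤ p.1 := hl p (by simp)
      have hs : (1 : Int) <<< ((7 : Int) - p.1) = ((2 ^ (7 - p.1.toNat) : Nat) : Int) := by
        rw [show (7 : Int) - p.1 = ((7 - p.1.toNat : Nat) : Int) by omega, Int.shiftLeft_eq_mul_pow]
        push_cast [Nat.one_shiftLeft]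
        ring
      rw [if_pos hc, if_pos hc, hs, PySem.Int.bor_natCast]
      exact ih (fun q hq => hl q (List.mem_cons_of_mem _ hq)) _
    · rw [if_neg hc, if_neg hc]
      exact ih (fun q hq => hl q (List.mem_cons_of_mem _ hq)) _

theorem pvA_cast2 (sel : List String) (l : List (Int × String)) (hl : ∀ p ∈ l, 0 ≤ p.1 ∧ p.1 ≤ 15) (n : Nat) :
    l.foldl (fun (a : Int) (p : Int × String) =>
        if sel.contains p.2 && !decide (p.1 < 8) then PySem.Int.bor a (1 <<< ((15 : Int) - p.1)) else a) (n : Int)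
    = ((l.foldl (fun (a : Nat) (p : Int × String) =>
        if sel.contains p.2 && !decide (p.1 < 8) then a ||| 2 ^ (15 - p.1.toNat) else a) n : Nat) : Int) := by
  induction l generalizing n with
  | nil => rfl
  | cons p l ih =>
    simp only [List.foldl_cons]
    by_cases hc : (sel.contains p.2 && !decide (p.1 < 8)) = true
    · have h15 : p.1 ≤ 15 := (hl p (by simp)).2
      have h0 : 0 ≤ p.1 := (hl p (by simp)).1
      have hs : (1 : Int) <<< ((15 : Int) - p.1) = ((2 ^ (15 - p.1.toNat) : Nat) : Int) := by
        rw [show (15 : Int) - p.1 = ((15 - p.1.toNat : Nat) : Int) by omega, Int.shiftLeft_eq_mul_pow]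
        push_cast [Nat.one_shiftLeft]
        ring
      rw [if_pos hc, if_pos hc, hs, PySem.Int.bor_natCast]
      exact ih (fun q hq => hl q (List.mem_cons_of_mem _ hq)) _
    · rw [if_neg hc, if_neg hc]
      exact ih (fun q hq => hl q (List.mem_cons_of_mem _ hq)) _

theorem pv_enum : PySem.List.enumerate pvEstablishedTimings = [((0 : Int), "720x400 @ 70Hz"), ((1 : Int), "720x400 @ 88Hz"), ((2 : Int), "640x480 @ 60Hz"), ((3 : Int), "640x480 @ 67Hz"), ((4 : Int), "640x480 @ 72Hz"), ((5 : Int), "640x480 @ 75Hz"), ((6 : Int), "800x600 @ 56Hz"), ((7 : Int), "800x600 @ 60Hz"), ((8 : Int), "800x600 @ 72Hz"), ((9 : Int), "800x600 @ 75Hz"), ((10 : Int), "832x624 @ 75Hz"), ((11 : Int), "1024x768 @ 87Hz (interlaced)"), ((12 : Int), "1024x768 @ 60Hz"), ((13 : Int), "1024x768 @ 70Hz"), ((14 : Int), "1024x768 @ 75Hz"), ((15 : Int), "1280x1024 @ 75Hz")] := rfl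

theorem pv_comp1 (sel : List String) :
    ([((0 : Int), "720x400 @ 70Hz"), ((1 : Int), "720x400 @ 88Hz"), ((2 : Int), "640x480 @ 60Hz"), ((3 : Int), "640x480 @ 67Hz"), ((4 : Int), "640x480 @ 72Hz"), ((5 : Int), "640x480 @ 75Hz"), ((6 : Int), "800x600 @ 56Hz"), ((7 : Int), "800x600 @ 60Hz"), ((8 : Int), "800x600 @ 72Hz"), ((9 : Int), "800x600 @ 75Hz"), ((10 : Int), "832x624 @ 75Hz"), ((11 : Int), "1024x768 @ 87Hz (interlaced)"), ((12 : Int), "1024x768 @ 60Hz"), ((13 : Int), "1024x768 @ 70Hz"), ((14 : Int), "1024x768 @ 75Hz"), ((15 : Int), "1280x1024 @ 75Hz")].foldl (fun (a : Nat) (p : Int × String) =>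
        if sel.contains p.2 && decide (p.1 < 8) then a ||| 2 ^ (7 - p.1.toNat) else a) 0)
      = pvWordN sel 0 >>> 8 := by
  apply Nat.eq_of_testBit_eq
  intro j
  rw [pv_foldl_ite_or_testBit, Nat.testBit_shiftRight, pvWordN_testBit]
  norm_num [pvKeys16, Nat.testBit_two_pow, Int.toNat]
  rcases Nat.lt_or_ge j 8 with hj | hj
  · interval_cases j <;> simp
  · have h1 : ∀ c : Nat, c ≤ 7 → decide (c = j) = false := fun c hc => decide_eq_false (by omega)
    have h2 : ∀ c : Nat, c ≤ 15 → decide (c = 8 + j) = false := fun c hc => decide_eq_false (by omega)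
    have h3 : decide (j = 0) = false := decide_eq_false (by omega)
    simp [h1, h2, h3]

theorem pv_comp2 (sel : List String) :
    ([((0 : Int), "720x400 @ 70Hz"), ((1 : Int), "720x400 @ 88Hz"), ((2 : Int), "640x480 @ 60Hz"), ((3 : Int), "640x480 @ 67Hz"), ((4 : Int), "640x480 @ 72Hz"), ((5 : Int), "640x480 @ 75Hz"), ((6 : Int), "800x600 @ 56Hz"), ((7 : Int), "800x600 @ 60Hz"), ((8 : Int), "800x600 @ 72Hz"), ((9 : Int), "800x600 @ 75Hz"), ((10 : Int), "832x624 @ 75Hz"), ((11 : Int), "1024x768 @ 87Hz (interlaced)"), ((12 : Int), "1024x768 @ 60Hz"), ((13 : Int), "1024x768 @ 70Hz"), ((14 : Int), "1024x768 @ 75Hz"), ((15 : Int), "1280x1024 @ 75Hz")].foldl (fun (a : Nat) (p : Int × String) =>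
        if sel.contains p.2 && !decide (p.1 < 8) then a ||| 2 ^ (15 - p.1.toNat) else a) 0)
      = pvWordN sel 0 &&& 255 := by
  apply Nat.eq_of_testBit_eq
  intro j
  rw [pv_foldl_ite_or_testBit, Nat.testBit_and, pvWordN_testBit,
      show (255 : Nat) = 2 ^ 8 - 1 by norm_num, Nat.testBit_two_pow_sub_one]
  norm_num [pvKeys16, Nat.testBit_two_pow, Int.toNat]
  rcases Nat.lt_or_ge j 8 with hj | hj
  · interval_cases j <;> simp
  · have h1 : ∀ c : Nat, c ≤ 7 → decide (c = j) = false := fun c hc => decide_eq_false (by omega)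
    have h2 : decide (j < 8) = false := decide_eq_false (by omega)
    simp [h1, h2]

theorem pvA_split (sel : List String) (l : List (Int × String)) (t : Int × Int) :
    l.foldl (fun (tt : Int × Int) (p : Int × String) =>
      if sel.contains p.2 then
        if p.1 < 8 then (PySem.Int.bor tt.1 (1 <<< (7 - p.1)), tt.2)
        else (tt.1, PySem.Int.bor tt.2 (1 <<< (15 - p.1)))
      else tt) t
    = (l.foldl (fun (a : Int) (p : Int × String) => if sel.contains p.2 && decide (p.1 < 8) then PySem.Int.bor a (1 <<< ((7 : Int) - p.1)) else a) t.1,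
       l.foldl (fun (a : Int) (p : Int × String) => if sel.contains p.2 && !decide (p.1 < 8) then PySem.Int.bor a (1 <<< ((15 : Int) - p.1)) else a) t.2) := by
  induction l generalizing t with
  | nil => rfl
  | cons p l ih =>
    simp only [List.foldl_cons]
    rw [ih]
    by_cases hc : p.2 ∈ sel <;> by_cases h8 : p.1 < 8 <;> simp [hc, h8]

theorem pv_main (sel : List String) :
    (PySem.List.enumerate pvEstablishedTimings).foldl
      (fun (tt : Int × Int) (p : Int × String) =>
        if sel.contains p.2 then
          if p.1 < 8 then (PySem.Int.bor tt.1 (1 <<< (7 - p.1)), tt.2)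
          else (tt.1, PySem.Int.bor tt.2 (1 <<< (15 - p.1)))
        else tt) (0, 0)
    = ((pvWordN sel 0 : Int) >>> (8 : Nat),
       PySem.Int.band (pvWordN sel 0 : Int) 255) := by
  rw [pv_enum, pvA_split]
  refine Prod.ext ?_ ?_
  · show List.foldl _ ((0:Nat) : Int) _ = _
    rw [pvA_cast1 sel _ (by decide), pv_comp1 sel, Int.natCast_shiftRight]
  · show List.foldl _ ((0:Nat) : Int) _ = _
    rw [pvA_cast2 sel _ (by decide), pv_comp2 sel,
        show (255 : Int) = ((255 : Nat) : Int) from rfl, PySem.Int.band_natCast]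

-- ===== VERDICT (by name: the statement is the Claim_ definition above) =====
theorem encode_established_timings_spec : Claim_equal_encode_established_timings := by
  intro sel mb _
  unfold Spec_encode_established_timings encode_established_timings encode_established_timings_alt
  have hb := pvB_cast sel 0
  simp only [Nat.cast_zero] at hb
  simp only [pv_main sel, hb]
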